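-- pv_equiv track=rewrite | github.com/ADS-AI/Obj2Sub-AIED2022 | Obj2Sub/code/helper.py | aux_verb_check
-- ===== SOURCE A (Python) =====
-- def aux_verb_check(wordList):
--     """ "
--     Function that checks auxilary verbs in the input list of words
--     Parameters
--     ----------
--     wordList: list of words
--
--     Returns
--     -----------
--     """
--     auxilliary_verbs = [
--         "is",
--         "are",
--         "was",
--         "were",
--         "has",
--         "have",
--         "can",
--         "should",
--         "do",
--         "would",
--         "will",
--         "does",
--     ]
--     for verb in auxilliary_verbs:
--         for word in wordList:
--             if word == verb:
--                 return wordList.index(word), verb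
--     return None, None
-- ===== SOURCE B (Python) =====
-- def aux_verb_check(wordList):
--     auxilliary_verbs = [
--         "is", "are", "was", "were", "has", "have",
--         "can", "should", "do", "would", "will", "does",
--     ]
--     verb_set = set(auxilliary_verbs)
--     first_index = {}
--     for i, word in enumerate(wordList):
--         if word in verb_set:
--             first_index.setdefault(word, i)
--     for verb in auxilliary_verbs:
--         if verb in first_index:
--             return first_index[verb], verb
--     return None, None
-- ===== Notes on version B (the rewrite author's own statement) =====
-- stated objective: faster
-- what changed: Replaces the nested verb-outer/word-inner scan (plus a redundant wordList.index pass) with a single indexing pass over wordList that records each auxiliary verb's first occurrence in a dict, followed by one priority-ordered dict lookup.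
import Mathlib
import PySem

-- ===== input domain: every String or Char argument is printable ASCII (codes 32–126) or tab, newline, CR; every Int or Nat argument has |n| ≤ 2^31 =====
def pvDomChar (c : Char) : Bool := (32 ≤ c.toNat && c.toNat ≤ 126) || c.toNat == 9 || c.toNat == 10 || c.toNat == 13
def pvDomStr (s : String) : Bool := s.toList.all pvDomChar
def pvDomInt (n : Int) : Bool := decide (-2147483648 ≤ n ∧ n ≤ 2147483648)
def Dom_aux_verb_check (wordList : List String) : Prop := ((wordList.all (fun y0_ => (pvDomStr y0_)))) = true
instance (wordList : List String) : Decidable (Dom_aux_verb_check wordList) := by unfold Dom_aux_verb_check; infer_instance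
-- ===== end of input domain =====

-- B replaces A's verb-outer/word-inner nested scan with one first-occurrence-index pass
-- over wordList plus a priority-ordered dict lookup (objective: faster, constant-factor).

-- ===== PORT A =====
def pvVerbsA : List String :=
  ["is", "are", "was", "were", "has", "have", "can", "should", "do", "would", "will", "does"]

-- inner 'for word in wordList: if word == verb: return wordList.index(word), verb'
def pvInnerA (wordList : List String) (verb : String) : List String → Option (Option Int × Option String)
  | [] => none
  | word :: rest =>
    if word == verb then some ((PySem.List.index? wordList word).map (fun n => (n : Int)), some verb)
    else pvInnerA wordList verb rest

-- outer 'for verb in auxilliary_verbs: …; return None, None'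
def pvOuterA (wordList : List String) : List String → Option Int × Option String
  | [] => (none, none)
  | verb :: vs =>
    match pvInnerA wordList verb wordList with
    | some r => r
    | none => pvOuterA wordList vs

def aux_verb_check (wordList : List String) : Option Int × Option String :=
  pvOuterA wordList pvVerbsA

-- ===== PORT B =====
def pvVerbsB : List String :=
  ["is", "are", "was", "were", "has", "have", "can", "should", "do", "would", "will", "does"]

def pvVerbSet : PySem.Set String := PySem.Set.ofList pvVerbsB

-- one pass: 'for i, word in enumerate(wordList): if word in verb_set: first_index.setdefault(word, i)'
def pvBuildB (wordList : List String) : PySem.Dict String Int :=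
  (PySem.List.enumerate wordList 0).foldl
    (fun d p => if pvVerbSet.contains p.2 then d.setdefault p.2 p.1 else d)
    PySem.Dict.empty

-- priority lookup: 'for verb in auxilliary_verbs: if verb in first_index: return first_index[verb], verb'
def pvLookupB (d : PySem.Dict String Int) : List String → Option Int × Option String
  | [] => (none, none)
  | verb :: vs =>
    match d.get? verb with
    | some i => (some i, some verb)
    | none => pvLookupB d vs

def aux_verb_check_alt (wordList : List String) : Option Int × Option String :=
  pvLookupB (pvBuildB wordList) pvVerbsB

-- ===== PRECONDITION & SPEC =====
def Spec_aux_verb_check (wordList : List String) (out : Option Int × Option String) : Prop := out = aux_verb_check_alt wordList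
instance (wordList : List String) (out : Option Int × Option String) : Decidable (Spec_aux_verb_check wordList out) := by unfold Spec_aux_verb_check; infer_instance

-- ===== CLAIM (what is proved, stated in full; the proofs are below) =====
def Claim_equal_aux_verb_check : Prop := ∀ (wordList : List String), Dom_aux_verb_check wordList → Spec_aux_verb_check wordList (aux_verb_check wordList)

-- ===== LEMMAS AND PROOFS =====

-- A's inner loop finds verb in ws iff verb ∈ ws, returning the first index of verb in wordList.
theorem pvInnerA_char (wordList : List String) (verb : String) :
    ∀ ws : List String, pvInnerA wordList verb ws =
      if verb ∈ ws then some ((PySem.List.index? wordList verb).map (fun n => (n : Int)), some verb)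
      else none := by
  intro ws
  induction ws with
  | nil => simp [pvInnerA]
  | cons w rest ih =>
    by_cases h : w = verb
    · subst h; simp [pvInnerA]
    · simp [pvInnerA, h, ih, Ne.symm h]

-- The dict built by B's pass: lookup at v is the first index of v in ws (shifted by start s),
-- provided v is not already in d and is an auxiliary verb.
theorem pvBuild_get? (v : String) :
    ∀ (ws : List String) (s : Int) (d : PySem.Dict String Int),
      ((PySem.List.enumerate ws s).foldl
        (fun d p => if pvVerbSet.contains p.2 then d.setdefault p.2 p.1 else d) d).get? v =
      match d.get? v with
      | some i => some i
      | none =>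
        if pvVerbSet.contains v then (PySem.List.index? ws v).map (fun n => s + (n : Int))
        else none := by
  intro ws
  induction ws with
  | nil =>
    intro s d
    simp only [PySem.List.enumerate_nil, List.foldl_nil]
    cases hd : d.get? v with
    | some i => rfl
    | none => simp [PySem.List.index?]
  | cons w rest ih =>
    intro s d
    rw [PySem.List.enumerate_cons, List.foldl_cons, ih]
    by_cases hw : w = v
    · subst hw
      by_cases hset : w ∈ pvVerbSet
      · cases hd : d.get? w with
        | some i => simp [hset, hd, PySem.Dict.get?_setdefault_self]
        | none =>
          rw [PySem.List.index?_cons_self]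
          simp [hset, hd, PySem.Dict.get?_setdefault_self]
      · cases hd : d.get? w with
        | some i => simp [hset, hd]
        | none => simp [hset, hd]
    · have hne : v ≠ w := Ne.symm hw
      have hstep :
          (if pvVerbSet.contains w then d.setdefault w s else d).get? v = d.get? v := by
        by_cases hset : w ∈ pvVerbSet
        · simp [hset, PySem.Dict.get?_setdefault_of_ne d s hne]
        · simp [hset]
      rw [hstep]
      cases hd : d.get? v with
      | some i => simp
      | none =>
        by_cases hv : v ∈ pvVerbSet
        · have hvc : pvVerbSet.contains v = true := by simpa using hv
          simp only [hvc, if_true]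
          rw [PySem.List.index?_cons_of_ne rest hw]
          cases PySem.List.index? rest v with
          | none => simp
          | some k =>
            simp only [Option.bind_eq_bind, Option.pure_def, Option.bind_some, Option.map_some, Option.some.injEq]
            push_cast
            ring
        · simp [hv]

theorem pvMain (wordList : List String) :
    ∀ vs : List String, (∀ v ∈ vs, v ∈ pvVerbSet) →
      pvOuterA wordList vs = pvLookupB (pvBuildB wordList) vs := by
  intro vs
  induction vs with
  | nil => intro _; rfl
  | cons verb rest ih =>
    intro hsub
    have hv : verb ∈ pvVerbSet := hsub verb (by simp)
    have hget : (pvBuildB wordList).get? verb =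
        (PySem.List.index? wordList verb).map (fun n => (0 : Int) + (n : Int)) := by
      unfold pvBuildB
      rw [pvBuild_get? verb wordList 0 PySem.Dict.empty]
      simp [PySem.Dict.get?_empty, hv]
    rw [pvOuterA, pvLookupB, pvInnerA_char, hget]
    cases hidx : PySem.List.index? wordList verb with
    | some k =>
      have hmem : verb ∈ wordList := by
        rw [← PySem.List.index?_isSome_iff wordList verb, hidx]; rfl
      simp [hmem]
    | none =>
      have hmem : verb ∉ wordList := by
        rw [← PySem.List.index?_eq_none_iff wordList verb, hidx]
      simp only [hmem, if_false]
      exact ih (fun v hvmem => hsub v (by simp [hvmem]))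

-- ===== VERDICT (by name: the statement is the Claim_ definition above) =====
theorem aux_verb_check_spec : Claim_equal_aux_verb_check := by
  intro wordList _
  unfold Spec_aux_verb_check aux_verb_check aux_verb_check_alt
  exact pvMain wordList pvVerbsA (by decide)
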